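-- pv_equiv track=rewrite | github.com/Nishant-hub-9977/CleanFilesBackend | recruitai-backend-clean/app/services/ai_service.py | _extract_education_offline
-- ===== SOURCE A (Python) =====
-- from typing import Dict, List, Any, Optional, Union
--
-- def _extract_education_offline(text: str) -> List[str]:
--     """Extract education information"""
--     education_keywords = [
--         "bachelor", "master", "phd", "doctorate", "mba", "degree",
--         "university", "college", "institute", "school"
--     ]
--
--     education = []
--     text_lower = text.lower()
--
--     for keyword in education_keywords:
--         if keyword in text_lower:
--             # Try to extract the full education line
--             lines = text.split('\n')
--             for line in lines:
--                 if keyword in line.lower():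
--                     education.append(line.strip())
--                     break
--
--     return education[:3]  # Return top 3 education entries
-- ===== SOURCE B (Python) =====
-- from typing import List
--
-- def _extract_education_offline(text: str) -> List[str]:
--     """Extract education information (single line scan building a first-match index)."""
--     education_keywords = [
--         "bachelor", "master", "phd", "doctorate", "mba", "degree",
--         "university", "college", "institute", "school"
--     ]
--
--     first_line = {}
--     for line in text.split('\n'):
--         low = line.lower()
--         for kw in education_keywords:
--             if kw not in first_line and kw in low:
--                 first_line[kw] = line.strip()
--
--     return [first_line[kw] for kw in education_keywords if kw in first_line][:3]
-- ===== Notes on version B (the rewrite author's own statement) =====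
-- stated objective: alternative
-- what changed: Replaces A's keyword-major loop (which re-splits the text and rescans all lines for every matching keyword) by a single line-major pass that builds a first-match dict from keywords to stripped lines, then emits dict hits in keyword order sliced to three.
import Mathlib
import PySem

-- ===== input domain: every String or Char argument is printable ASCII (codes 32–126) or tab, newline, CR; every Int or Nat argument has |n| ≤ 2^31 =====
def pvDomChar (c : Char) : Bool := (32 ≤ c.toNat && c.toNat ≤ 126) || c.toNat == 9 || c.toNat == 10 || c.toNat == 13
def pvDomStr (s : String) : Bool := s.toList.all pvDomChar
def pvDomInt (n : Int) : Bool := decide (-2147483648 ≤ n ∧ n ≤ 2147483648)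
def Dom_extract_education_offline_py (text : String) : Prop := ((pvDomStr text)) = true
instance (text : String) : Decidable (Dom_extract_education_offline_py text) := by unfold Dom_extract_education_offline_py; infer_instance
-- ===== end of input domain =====

-- B replaces A's keyword-major loop (a fresh split and full line rescan per matching keyword) by a single
-- line-major pass that builds a first-match dict, then a keyword-ordered emit pass (alternative decomposition).

-- ===== PORT A =====
-- the education_keywords literal shared by both sources
def pvEduKeywords : List String :=
  ["bachelor", "master", "phd", "doctorate", "mba", "degree",
   "university", "college", "institute", "school"]

def extract_education_offline_py (text : String) : List String :=
  let text_lower := PySem.Str.lower text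
  let education := pvEduKeywords.foldl (fun ed kw =>
    if PySem.Str.isIn kw text_lower then
      let lines := (PySem.Str.split? text "\n").getD []
      match lines.find? (fun line => PySem.Str.isIn kw (PySem.Str.lower line)) with
      | some line => ed ++ [PySem.Str.strip line]
      | none => ed
    else ed) []
  PySem.List.slice education none (some 3)

-- ===== PORT B =====
def extract_education_offline_py_alt (text : String) : List String :=
  let first_line : PySem.Dict String String :=
    ((PySem.Str.split? text "\n").getD []).foldl (fun d line =>
      let low := PySem.Str.lower line
      pvEduKeywords.foldl (fun d kw =>
        if !(d.contains kw) && PySem.Str.isIn kw low then d.insert kw (PySem.Str.strip line) else d) d)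
      PySem.Dict.empty
  PySem.List.slice (pvEduKeywords.filterMap (fun kw => first_line.get? kw)) none (some 3)

-- ===== PRECONDITION & SPEC =====
def Spec_extract_education_offline_py (text : String) (out : List String) : Prop := out = extract_education_offline_py_alt text
instance (text : String) (out : List String) : Decidable (Spec_extract_education_offline_py text out) := by unfold Spec_extract_education_offline_py; infer_instance

-- ===== CLAIM (what is proved, stated in full; the proofs are below) =====
def Claim_equal_extract_education_offline_py : Prop := ∀ (text : String), Dom_extract_education_offline_py text → Spec_extract_education_offline_py text (extract_education_offline_py text)

-- ===== LEMMAS AND PROOFS =====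
lemma splitOn_go_infix (sep : List Char) : ∀ (fuel : Nat) (l cur : List Char) (acc : List (List Char)) (x : List Char),
    x ∈ PySem.Chars.splitOn.go sep fuel l cur acc → x ∈ acc ∨ x <:+: cur.reverse ++ l := by
  intro fuel
  induction fuel with
  | zero =>
    intro l cur acc x hx
    simp only [PySem.Chars.splitOn.go, List.mem_reverse, List.mem_cons] at hx
    rcases hx with h | h
    · exact Or.inr (h ▸ List.infix_refl _)
    · exact Or.inl h
  | succ fuel ih =>
    intro l cur acc x hx
    cases l with
    | nil =>
      simp only [PySem.Chars.splitOn.go, List.mem_reverse, List.mem_cons] at hx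
      rcases hx with h | h
      · exact Or.inr (by simp [h])
      · exact Or.inl h
    | cons c rest =>
      rw [PySem.Chars.splitOn.go] at hx
      by_cases hp : sep.isPrefixOf (c :: rest) = true
      · rw [if_pos hp] at hx
        rcases ih _ _ _ x hx with h | h
        · rcases List.mem_cons.mp h with h | h
          · exact Or.inr (h ▸ (List.prefix_append _ _).isInfix)
          · exact Or.inl h
        · refine Or.inr (.trans (l₂ := List.drop sep.length (c :: rest)) (by simpa using h) ?_)
          exact ((List.drop_suffix _ _).trans (List.suffix_append _ _)).isInfix
      · rw [if_neg hp] at hx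
        rcases ih _ _ _ x hx with h | h
        · exact Or.inl h
        · refine Or.inr ?_
          have he : (c :: cur).reverse ++ rest = cur.reverse ++ c :: rest := by simp
          exact he ▸ h

lemma mem_splitOn_infix (s sep x : List Char) (hx : x ∈ PySem.Chars.splitOn s sep) : x <:+: s := by
  unfold PySem.Chars.splitOn at hx
  rcases splitOn_go_infix sep _ _ _ _ _ hx with h | h
  · simp at h
  · simpa using h

def pvLines (text : String) : List String := (PySem.Str.split? text "\n").getD []
def pvHit (kw line : String) : Bool := PySem.Str.isIn kw (PySem.Str.lower line)
def pvFirst (text kw : String) : Option String := ((pvLines text).find? (pvHit kw)).map PySem.Str.strip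

lemma mem_pvLines_infix (text line : String) (h : line ∈ pvLines text) : line.toList <:+: text.toList := by
  unfold pvLines at h
  have hmap := PySem.Str.split?_map text "\n"
  cases hsp : PySem.Str.split? text "\n" with
  | none =>
    rw [hsp] at hmap
    simp [PySem.Chars.split?] at hmap
  | some L =>
    rw [hsp] at hmap
    rw [hsp] at h
    simp only [Option.map_some, PySem.Chars.split?] at hmap
    rw [if_neg (by decide)] at hmap
    have hmem : line.toList ∈ PySem.Chars.splitOn text.toList ("\n".toList) := by
      rw [← Option.some_inj.mp hmap]
      exact List.mem_map_of_mem (by simpa using h)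
    exact mem_splitOn_infix _ _ _ hmem

lemma hit_imp_isIn_lower (text kw line : String) (hmem : line ∈ pvLines text)
    (hhit : pvHit kw line = true) : PySem.Str.isIn kw (PySem.Str.lower text) = true := by
  rw [PySem.Str.isIn_iff_infix, PySem.Str.toList_lower]
  unfold pvHit at hhit
  rw [PySem.Str.isIn_iff_infix, PySem.Str.toList_lower] at hhit
  refine hhit.trans ?_
  simp only [PySem.Chars.lower]
  exact (mem_pvLines_infix text line hmem).map _

lemma portA_body (text kw : String) (ed : List String) :
    (if PySem.Str.isIn kw (PySem.Str.lower text) then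
      match (pvLines text).find? (fun line => PySem.Str.isIn kw (PySem.Str.lower line)) with
      | some line => ed ++ [PySem.Str.strip line]
      | none => ed
    else ed) = ed ++ (pvFirst text kw).toList := by
  have hfun : (fun line => PySem.Str.isIn kw (PySem.Str.lower line)) = pvHit kw := rfl
  rw [hfun]
  unfold pvFirst
  by_cases hin : PySem.Str.isIn kw (PySem.Str.lower text) = true
  · rw [if_pos hin]
    cases hf : (pvLines text).find? (pvHit kw) <;> simp
  · rw [if_neg hin]
    cases hf : (pvLines text).find? (pvHit kw) with
    | none => simp
    | some line =>
      exact absurd (hit_imp_isIn_lower text kw line (List.mem_of_find?_eq_some hf)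
        (List.find?_some hf)) hin

lemma portA_fold (text : String) : ∀ (ks : List String) (ed : List String),
    ks.foldl (fun ed kw =>
      if PySem.Str.isIn kw (PySem.Str.lower text) then
        match ((PySem.Str.split? text "\n").getD []).find?
            (fun line => PySem.Str.isIn kw (PySem.Str.lower line)) with
        | some line => ed ++ [PySem.Str.strip line]
        | none => ed
      else ed) ed = ed ++ ks.filterMap (pvFirst text) := by
  intro ks
  induction ks with
  | nil => simp
  | cons k ks ih =>
    intro ed
    have hb := portA_body text k ed
    unfold pvLines at hb
    simp only [List.foldl_cons, hb, List.filterMap_cons, ih]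
    cases pvFirst text k <;> simp

lemma portA_eq (text : String) :
    extract_education_offline_py text
      = PySem.List.slice (pvEduKeywords.filterMap (pvFirst text)) none (some 3) := by
  simp only [extract_education_offline_py]
  rw [portA_fold text pvEduKeywords []]
  rfl

lemma inner_get (line : String) : ∀ (ks : List String) (d : PySem.Dict String String) (kw : String),
    ((ks.foldl (fun d k =>
        if !(d.contains k) && PySem.Str.isIn k (PySem.Str.lower line) then
          d.insert k (PySem.Str.strip line) else d) d).get? kw)
    = if kw ∈ ks ∧ d.contains kw = false ∧ pvHit kw line = true then
        some (PySem.Str.strip line) else d.get? kw := by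
  intro ks
  induction ks with
  | nil => simp
  | cons k ks ih =>
    intro d kw
    simp only [List.foldl_cons]
    by_cases hk : kw = k
    · subst hk
      by_cases hc : (!(d.contains kw) && PySem.Str.isIn kw (PySem.Str.lower line)) = true
      · rw [if_pos hc, ih]
        have hc' : d.contains kw = false ∧ pvHit kw line = true := by
          simpa [pvHit, Bool.and_eq_true, Bool.not_eq_true'] using hc
        have h1 : (d.insert kw (PySem.Str.strip line)).contains kw = true :=
          PySem.Dict.contains_insert_self d kw _
        have h2 := PySem.Dict.get?_insert_self d kw (PySem.Str.strip line)
        simp [h1, h2, hc'.1, hc'.2, List.mem_cons]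
      · rw [if_neg hc, ih]
        have hc' : ¬ (d.contains kw = false ∧ pvHit kw line = true) := by
          simpa [pvHit, Bool.and_eq_true, Bool.not_eq_true'] using hc
        by_cases hdc : d.contains kw = false
        · have hhit : ¬ pvHit kw line = true := fun hh => hc' ⟨hdc, hh⟩
          simp [hhit]
        · simp [hdc]
    · by_cases hc : (!(d.contains k) && PySem.Str.isIn k (PySem.Str.lower line)) = true
      · rw [if_pos hc, ih]
        have h1 : (d.insert k (PySem.Str.strip line)).contains kw = d.contains kw := by
          rw [PySem.Dict.contains_insert]
          simp [hk]
        have h2 := PySem.Dict.get?_insert_of_ne d (PySem.Str.strip line) hk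
        simp [h1, h2, List.mem_cons, hk]
      · rw [if_neg hc, ih]
        simp [List.mem_cons, hk]

lemma lines_get (kw : String) : ∀ (ls : List String) (d : PySem.Dict String String),
    ((ls.foldl (fun d line =>
        pvEduKeywords.foldl (fun d k =>
          if !(d.contains k) && PySem.Str.isIn k (PySem.Str.lower line) then
            d.insert k (PySem.Str.strip line) else d) d) d).get? kw)
    = (d.get? kw).or (if kw ∈ pvEduKeywords then (ls.find? (pvHit kw)).map PySem.Str.strip else none) := by
  intro ls
  induction ls with
  | nil => intro d; simp
  | cons line ls ih =>
    intro d
    simp only [List.foldl_cons]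
    rw [ih, inner_get line pvEduKeywords d kw]
    by_cases hmem : kw ∈ pvEduKeywords
    · cases hd : d.get? kw with
      | some v =>
        have hc : d.contains kw = true := by rw [PySem.Dict.contains_eq_isSome_get?, hd]; rfl
        simp [hmem, hc]
      | none =>
        have hc : d.contains kw = false := by rw [PySem.Dict.contains_eq_isSome_get?, hd]; rfl
        cases hhit : pvHit kw line with
        | true => simp [hmem, hc, hhit]
        | false => simp [hmem, hc, hhit]
    · simp [hmem]

lemma portB_eq (text : String) :
    extract_education_offline_py_alt text
      = PySem.List.slice (pvEduKeywords.filterMap (pvFirst text)) none (some 3) := by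
  simp only [extract_education_offline_py_alt]
  congr 1
  refine List.filterMap_congr ?_
  intro kw hkw
  rw [lines_get kw _ PySem.Dict.empty]
  simp [hkw, pvFirst, pvLines]

-- ===== VERDICT (by name: the statement is the Claim_ definition above) =====
theorem extract_education_offline_py_spec : Claim_equal_extract_education_offline_py := by
  intro text _
  unfold Spec_extract_education_offline_py
  rw [portA_eq, portB_eq]
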